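-- pv_equiv track=rewrite | github.com/stanislascode/AdventOfCode2023 | Day_12/day_12_part_2_bis.py | tri_row
-- ===== SOURCE A (Python) =====
-- def tri_row(row):
--     i = 0
--     tableau = []
--     while i <len(row):
--         while i <len(row) and (row[i] == '.'):
--             i+=1
--         tab = []
--         while i <len(row) and (row[i] != '.'):
--             tab.append(row[i])
--             i+=1
--         if tab != []:
--             tableau.append(tab)
--     return tableau
-- ===== SOURCE B (Python) =====
-- def tri_row(row):
--     # Recursive divide: split off the prefix before the first '.', recurse on the suffix.
--     if '.' not in row:
--         return [row[:]] if row else []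
--     k = row.index('.')
--     head = row[:k]
--     rest = tri_row(row[k + 1:])
--     return ([head] + rest) if head else rest
-- ===== Notes on version B (the rewrite author's own statement) =====
-- stated objective: alternative
-- what changed: Replaced A's single iterative pass with nested index-advancing while loops by a recursive divide-and-conquer: find the first '.' with list.index, slice the list into the prefix run and the suffix, and recurse on the suffix.
import Mathlib
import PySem

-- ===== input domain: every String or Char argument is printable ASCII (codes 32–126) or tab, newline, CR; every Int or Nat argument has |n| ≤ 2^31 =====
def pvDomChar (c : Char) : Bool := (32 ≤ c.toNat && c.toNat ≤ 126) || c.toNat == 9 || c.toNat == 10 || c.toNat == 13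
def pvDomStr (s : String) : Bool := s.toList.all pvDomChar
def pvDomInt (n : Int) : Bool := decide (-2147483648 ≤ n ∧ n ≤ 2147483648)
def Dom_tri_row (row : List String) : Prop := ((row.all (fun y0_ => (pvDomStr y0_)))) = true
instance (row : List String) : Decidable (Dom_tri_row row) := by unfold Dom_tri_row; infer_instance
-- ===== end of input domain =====

-- B replaces A's iterative index-advancing while loops by a recursive divide at the first '.'; return values proved equal.

-- ===== PORT A =====
-- inner while: skip over '.' entries
def triSkip (row : List String) (i : Nat) : Nat :=
  if _h : i < row.length ∧ row.getD i "" = "." then triSkip row (i + 1) else i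
termination_by row.length - i
decreasing_by exact Nat.sub_succ_lt_self _ _ _h.1

-- inner while: collect a run of non-'.' entries, returning (tab, i)
def triTake (row : List String) (i : Nat) (tab : List String) : List String × Nat :=
  if _h : i < row.length ∧ row.getD i "" ≠ "." then
    triTake row (i + 1) (tab ++ [row.getD i ""])
  else (tab, i)
termination_by row.length - i
decreasing_by exact Nat.sub_succ_lt_self _ _ _h.1

-- these facts are cited by triOuter's decreasing_by (port-level termination)
theorem triSkip_ge (row : List String) (i : Nat) : i ≤ triSkip row i := by
  fun_induction triSkip with
  | case1 i h ih => omega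
  | case2 i h => omega

theorem triSkip_stop (row : List String) (i : Nat) :
    ¬ (triSkip row i < row.length ∧ row.getD (triSkip row i) "" = ".") := by
  fun_induction triSkip with
  | case1 i h ih => exact ih
  | case2 i h => exact h

theorem triTake_ge (row : List String) (i : Nat) (tab : List String) :
    i ≤ (triTake row i tab).2 := by
  fun_induction triTake with
  | case1 i tab h ih => omega
  | case2 i tab h => simp

theorem triTake_gt (row : List String) (i : Nat) (tab : List String)
    (h1 : i < row.length) (h2 : row.getD i "" ≠ ".") : i < (triTake row i tab).2 := by
  rw [triTake]
  rw [dif_pos ⟨h1, h2⟩]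
  have := triTake_ge row (i + 1) (tab ++ [row.getD i ""])
  omega

-- cited by triOuter's decreasing_by: one outer-loop iteration strictly advances the index
theorem triOuter_dec (row : List String) (i : Nat) (h : i < row.length) :
    row.length - (triTake row (triSkip row i) []).2 < row.length - i := by
  have hj := triSkip_ge row i
  have hstop := triSkip_stop row i
  by_cases hl : triSkip row i < row.length
  · have := triTake_gt row (triSkip row i) [] hl (fun hc => hstop ⟨hl, hc⟩)
    omega
  · have := triTake_ge row (triSkip row i) ([] : List String)
    omega

-- outer while loop of A
def triOuter (row : List String) (i : Nat) (tableau : List (List String)) : List (List String) :=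
  if h : i < row.length then
    let j := triSkip row i
    let r := triTake row j []
    triOuter row r.2 (if r.1 ≠ [] then tableau ++ [r.1] else tableau)
  else tableau
termination_by row.length - i
decreasing_by exact triOuter_dec row i h

def tri_row (row : List String) : List (List String) := triOuter row 0 []

-- ===== PORT B =====
-- cited by tri_row_alt's decreasing_by: the suffix slice row[k+1:] is strictly shorter
theorem triAlt_dec (row : List String) (k : Nat)
    (h : PySem.List.index? row "." = some k) :
    (PySem.List.slice row (some ((k : Int) + 1)) none).length < row.length := by
  obtain ⟨hk, -, -⟩ := PySem.List.getElem_of_index?_eq_some h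
  have : ((k : Int) + 1) = ((k + 1 : Nat) : Int) := by push_cast; ring
  rw [this, PySem.List.slice_from_natCast]
  simp [List.length_drop]
  omega

def tri_row_alt (row : List String) : List (List String) :=
  if hmem : "." ∉ row then
    if row ≠ [] then [PySem.List.slice row none none] else []   -- row[:]
  else
    match hk : PySem.List.index? row "." with
    | some k =>
        let head := PySem.List.slice row none (some (k : Int))          -- row[:k]
        let rest := tri_row_alt (PySem.List.slice row (some ((k : Int) + 1)) none)  -- row[k+1:]
        if head ≠ [] then head :: rest else rest
    | none => []  -- unreachable: index? is some iff "." ∈ row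
termination_by row.length
decreasing_by exact triAlt_dec row k hk

-- ===== PRECONDITION & SPEC =====
def Spec_tri_row (row : List String) (out : List (List String)) : Prop := out = tri_row_alt row
instance (row : List String) (out : List (List String)) : Decidable (Spec_tri_row row out) := by unfold Spec_tri_row; infer_instance

-- ===== CLAIM (what is proved, stated in full; the proofs are below) =====
def Claim_equal_tri_row : Prop := ∀ (row : List String), Dom_tri_row row → Spec_tri_row row (tri_row row)

-- ===== LEMMAS AND PROOFS =====

-- canonical grouping function: grpH c l = remaining groups given current run c
def grpH : List String → List String → List (List String)
  | c, [] => if c = [] then [] else [c]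
  | c, x :: xs =>
    if x = "." then (if c = [] then grpH [] xs else c :: grpH [] xs)
    else grpH (c ++ [x]) xs

-- ---- A-side: triOuter computes grpH ----

theorem drop_skip (row : List String) (i : Nat) :
    row.drop (triSkip row i) = (row.drop i).dropWhile (fun x => x == ".") := by
  fun_induction triSkip with
  | case1 i h ih =>
    rw [ih, List.drop_eq_getElem_cons h.1, List.dropWhile_cons]
    have : row[i] = "." := by
      have := h.2; rwa [List.getD_eq_getElem _ _ h.1] at this
    simp [this]
  | case2 i h =>
    by_cases hl : i < row.length
    · have hx : row.getD i "" ≠ "." := fun hc => h ⟨hl, hc⟩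
      rw [List.getD_eq_getElem _ _ hl] at hx
      rw [List.drop_eq_getElem_cons hl, List.dropWhile_cons]
      simp [hx]
    · have hd : row.drop i = [] := List.drop_eq_nil_of_le (by omega)
      simp [hd]

theorem take_spec (row : List String) (i : Nat) (tab : List String) :
    (triTake row i tab).1 = tab ++ (row.drop i).takeWhile (fun x => !(x == "."))
      ∧ row.drop (triTake row i tab).2
          = (row.drop i).dropWhile (fun x => !(x == ".")) := by
  fun_induction triTake with
  | case1 i tab h ih =>
    obtain ⟨hl, hx⟩ := h
    have hgd : row.getD i "" = row[i] := List.getD_eq_getElem _ _ hl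
    rw [hgd] at hx
    have hb : (row[i] == ".") = false := by simpa using hx
    rw [List.drop_eq_getElem_cons hl, List.takeWhile_cons, List.dropWhile_cons, hb]
    refine ⟨?_, by simpa using ih.2⟩
    rw [ih.1, hgd]
    simp
  | case2 i tab h =>
    by_cases hl : i < row.length
    · have hx : row.getD i "" = "." := by
        by_contra hc; exact h ⟨hl, hc⟩
      rw [List.getD_eq_getElem _ _ hl] at hx
      rw [List.drop_eq_getElem_cons hl, List.takeWhile_cons, List.dropWhile_cons]
      simp [hx]
    · have hd : row.drop i = [] := List.drop_eq_nil_of_le (by omega)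
      simp [hd]

theorem grpH_run (xs : List String) : ∀ c, c ≠ [] →
    grpH c xs = (c ++ xs.takeWhile (fun x => !(x == ".")))
      :: grpH [] (xs.dropWhile (fun x => !(x == "."))) := by
  induction xs with
  | nil => intro c hc; simp [grpH, hc]
  | cons x xs ih =>
    intro c hc
    by_cases hx : x = "."
    · simp [grpH, hx, hc]
    · have hb : (x == ".") = false := by simpa using hx
      rw [List.takeWhile_cons, List.dropWhile_cons, hb]
      simp only [grpH, hx, if_false, Bool.not_false, if_true]
      rw [ih (c ++ [x]) (by simp)]
      simp

theorem grpH_dots (l : List String) :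
    grpH [] l = grpH [] (l.dropWhile (fun x => x == ".")) := by
  induction l with
  | nil => simp
  | cons x xs ih =>
    by_cases hx : x = "."
    · rw [List.dropWhile_cons]
      simp only [hx]
      simpa [grpH] using ih
    · have hb : (x == ".") = false := by simpa using hx
      rw [List.dropWhile_cons, hb]
      simp

theorem dropWhile_head_false {α : Type} (p : α → Bool) :
    ∀ (l : List α) (x : α) (xs : List α), l.dropWhile p = x :: xs → p x = false := by
  intro l
  induction l with
  | nil => intro x xs h; simp at h
  | cons y ys ih =>
    intro x xs h
    rw [List.dropWhile_cons] at h
    by_cases hy : p y = true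
    · rw [if_pos hy] at h; exact ih x xs h
    · rw [if_neg hy] at h
      cases h
      simpa using hy

theorem outer_spec (row : List String) (i : Nat) (tableau : List (List String)) :
    triOuter row i tableau = tableau ++ grpH [] (row.drop i) := by
  fun_induction triOuter with
  | case1 i tableau h j r ih =>
    rw [dite_eq_ite] at ih
    rw [ih]
    have hskip : row.drop j = (row.drop i).dropWhile (fun x => x == ".") :=
      drop_skip row i
    have htake := take_spec row j []
    rw [grpH_dots (row.drop i), ← hskip]
    rcases hdj : row.drop j with _ | ⟨x, xs⟩
    · have h1 : r.1 = [] := by simpa [hdj] using htake.1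
      have h2 : row.drop r.2 = [] := by simpa [hdj] using htake.2
      simp [h1, h2, grpH]
    · have hx : (x == ".") = false :=
        dropWhile_head_false _ (row.drop i) x xs (by rw [← hskip, hdj])
      have hxne : x ≠ "." := by simpa using hx
      have h1 : r.1 = x :: xs.takeWhile (fun y => !(y == ".")) := by
        have := htake.1
        rw [hdj, List.takeWhile_cons, hx] at this
        simpa using this
      have h2 : row.drop r.2 = xs.dropWhile (fun y => !(y == ".")) := by
        have := htake.2
        rw [hdj, List.dropWhile_cons, hx] at this
        simpa using this
      rw [h2, h1]
      have hH : grpH [] (x :: xs)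
          = (x :: xs.takeWhile (fun y => !(y == ".")))
            :: grpH [] (xs.dropWhile (fun y => !(y == "."))) := by
        simp only [grpH, hxne, if_false, List.nil_append]
        rw [grpH_run xs [x] (by simp)]
        simp
      rw [hH]
      simp
  | case2 i tableau h =>
    have hd : row.drop i = [] := List.drop_eq_nil_of_le (by omega)
    simp [hd, grpH]

-- ---- B-side: tri_row_alt computes grpH ----

theorem grpH_nodot (l : List String) (hl : "." ∉ l) : ∀ c,
    grpH c l = if c ++ l = [] then [] else [c ++ l] := by
  induction l with
  | nil => intro c; simp [grpH]
  | cons x xs ih =>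
    intro c
    have hx : x ≠ "." := fun hc => hl (hc ▸ List.mem_cons_self)
    have hxs : "." ∉ xs := fun hc => hl (List.mem_cons_of_mem _ hc)
    rw [grpH, if_neg hx, ih hxs (c ++ [x])]
    simp

theorem grpH_append_nodot (ys : List String) (hys : "." ∉ ys) : ∀ c l,
    grpH c (ys ++ l) = grpH (c ++ ys) l := by
  induction ys with
  | nil => simp
  | cons y ys ih =>
    intro c l
    have hy : y ≠ "." := fun hc => hys (hc ▸ List.mem_cons_self)
    have hys' : "." ∉ ys := fun hc => hys (List.mem_cons_of_mem _ hc)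
    rw [List.cons_append, grpH, if_neg hy, ih hys' (c ++ [y]) l]
    simp

theorem alt_eq_grpH (row : List String) : tri_row_alt row = grpH [] row := by
  fun_induction tri_row_alt with
  | case1 row hmem hne =>
    rw [PySem.List.slice_none_none, grpH_nodot row hmem]
    simp [hne]
  | case2 row hmem hne =>
    have : row = [] := by simpa using hne
    simp [this, grpH]
  | case3 row hmem k hk head rest hhd ih =>
    obtain ⟨pre, suf, hrow, hlen, hpre⟩ := (PySem.List.index?_eq_some_iff row "." k).mp hk
    have hhead : head = pre := by
      show PySem.List.slice row none (some (k : Int)) = pre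
      rw [PySem.List.slice_to_natCast, hrow, ← hlen, List.take_left]
    have hsuf : PySem.List.slice row (some ((k : Int) + 1)) none = suf := by
      have hc : ((k : Int) + 1) = ((k + 1 : Nat) : Int) := by push_cast; ring
      rw [hc, PySem.List.slice_from_natCast, hrow, ← hlen]
      simp [List.drop_append]
    have hgr : grpH [] row = pre :: grpH [] suf := by
      rw [hrow, grpH_append_nodot pre hpre [] ("." :: suf)]
      have hp : pre ≠ [] := by rw [← hhead]; exact hhd
      simp only [List.nil_append, grpH, if_true, if_neg hp]
    rw [hgr, hhead]
    congr 1
    rw [← hsuf]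
    exact ih
  | case4 row hmem k hk head rest hhd ih =>
    obtain ⟨pre, suf, hrow, hlen, hpre⟩ := (PySem.List.index?_eq_some_iff row "." k).mp hk
    have hhead : head = pre := by
      show PySem.List.slice row none (some (k : Int)) = pre
      rw [PySem.List.slice_to_natCast, hrow, ← hlen, List.take_left]
    have hsuf : PySem.List.slice row (some ((k : Int) + 1)) none = suf := by
      have hc : ((k : Int) + 1) = ((k + 1 : Nat) : Int) := by push_cast; ring
      rw [hc, PySem.List.slice_from_natCast, hrow, ← hlen]
      simp [List.drop_append]
    have hp : pre = [] := by rw [← hhead]; simpa using hhd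
    have hgr : grpH [] row = grpH [] suf := by
      rw [hrow, grpH_append_nodot pre hpre [] ("." :: suf)]
      simp only [List.nil_append, grpH, if_true, if_pos hp]
    rw [hgr, ← hsuf]
    exact ih
  | case5 row hmem hk =>
    exact absurd ((PySem.List.index?_eq_none_iff row ".").mp hk) (by simpa using hmem)

-- ===== VERDICT (by name: the statement is the Claim_ definition above) =====
theorem tri_row_spec : Claim_equal_tri_row := by
  intro row _
  unfold Spec_tri_row
  rw [alt_eq_grpH, tri_row, outer_spec]
  simp
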